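-- pv_equiv track=rewrite | github.com/odevjorge/criptografia_polialfabetica | main.py | cript
-- ===== SOURCE A (Python) =====
-- sc = [6, 8]
--
-- alfa = [
--   'a', 'b', 'c', 'd', 'e', 'f', 'g', 'h', 'i', 'j', 'k', 'l', 'm', 'n', 'o',
--   'p', 'q', 'r', 's', 't', 'u', 'v', 'w', 'x', 'y', 'z', 'a', 'b', 'c', 'd',
--   'e', 'f', 'g', 'h', 'i', 'j', 'k', 'l', 'm', 'n', 'o', 'p', 'q', 'r', 's',
--   't', 'u', 'v', 'w', 'x', 'y', 'z', 'a', 'b', 'c', 'd', 'e', 'f', 'g', 'h',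
--   'i', 'j', 'k', 'l', 'm', 'n', 'o', 'p', 'q', 'r', 's', 't', 'u', 'v', 'w',
--   'x', 'y', 'z'
-- ]
--
-- def cript(opcao, palavra):
--   # FUNÇÃO QUE VAI FAZER A CRIPTOGRAFIA EM SI
--   def crip_palavra(palavra):
--     if type(palavra) == str:  # IF QUE VAI TRANSFORMAR E ENTRADA EM UMA LISTA SE FOR UMA STRING
--       palavra = list(palavra)
--
--     lista = []
--     for c in palavra:  # FOR QUE VAI LETRA POR LETRA SOMANDO O INDEX DA LETRA + O SALTO
--       if c == " ":
--         pass
--       else: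
--         if opcao == 1:  # IF PARA SABER SE ELE VAI CRIPTOGRAFAR OU DESCRIPTOGRAFAR
--           calc = 26 - sc[0]
--         else:
--           calc = sc[0]
--
--         # SE O ELE FOR DESCRIPTOGRAFAR ELE VAI PEGAR O INDEX DO (ALFABETO - SALTO) E VAI SOMAR COM O INDEX DA LETRA ATUAL
--         # OU SEJA O INDEX VAI PARAR NO SEGUNDO ALFABETO NA LISTA QUE VAI SER A EXATA LETRA QUE ELE PRECISA
--
--         lista.append(int(alfa.index(c)) + calc)
--
--     listaalfa = []
--     for i in lista:  # FOR PARA TRANSFORMAR A LISTA DE LETRAS QUE É NUMERIA EM LETRA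
--       listaalfa.append(alfa[i])
--
--     return listaalfa
--
--   paldecrip = crip_palavra(palavra)
--   for c in range(sc[1] - 1):  # FOR QUE VAI FAZER A QUANTIDADE DE SALTOS -1 PORQUE O PRIMEIRO FOI FEITO NA VARIAVEL ACIMA
--     paldecrip = crip_palavra(paldecrip)
--
--   return paldecrip
-- ===== SOURCE B (Python) =====
-- ALF = ['a', 'b', 'c', 'd', 'e', 'f', 'g', 'h', 'i', 'j', 'k', 'l', 'm',
--        'n', 'o', 'p', 'q', 'r', 's', 't', 'u', 'v', 'w', 'x', 'y', 'z']
--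
--
-- def cript(opcao, palavra):
--     # The 8 passes of shift 20 (opcao == 1) or 6 fold into one shift mod 26.
--     total = 4 if opcao == 1 else 22
--     out = []
--     for c in palavra:
--         if c != ' ':
--             out.append(ALF[(ALF.index(c) + total) % 26])
--     return out
-- ===== Notes on version B (the rewrite author's own statement) =====
-- stated objective: faster
-- what changed: Replaces the eight successive cipher passes (each rebuilding two intermediate lists over a 78-entry tripled alphabet) with a single pass that applies the folded total shift (8*20 = 4 or 8*6 = 22 mod 26) per character.
import Mathlib
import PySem

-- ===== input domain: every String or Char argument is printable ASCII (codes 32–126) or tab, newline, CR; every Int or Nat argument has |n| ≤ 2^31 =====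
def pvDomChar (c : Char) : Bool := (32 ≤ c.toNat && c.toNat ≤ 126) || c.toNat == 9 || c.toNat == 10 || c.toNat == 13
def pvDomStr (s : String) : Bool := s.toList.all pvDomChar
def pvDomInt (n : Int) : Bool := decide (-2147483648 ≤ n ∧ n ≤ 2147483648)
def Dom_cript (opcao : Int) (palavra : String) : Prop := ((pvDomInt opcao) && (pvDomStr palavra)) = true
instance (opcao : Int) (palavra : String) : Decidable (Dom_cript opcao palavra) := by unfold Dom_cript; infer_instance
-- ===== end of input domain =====

-- B folds A's eight cipher passes into a single pass with the combined shift taken mod 26 (same return value).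

-- ===== PORT A =====
def sc : List Int := [6, 8]

def alfa : List String :=
  ["a", "b", "c", "d", "e", "f", "g", "h", "i", "j", "k", "l", "m", "n", "o",
   "p", "q", "r", "s", "t", "u", "v", "w", "x", "y", "z", "a", "b", "c", "d",
   "e", "f", "g", "h", "i", "j", "k", "l", "m", "n", "o", "p", "q", "r", "s",
   "t", "u", "v", "w", "x", "y", "z", "a", "b", "c", "d", "e", "f", "g", "h",
   "i", "j", "k", "l", "m", "n", "o", "p", "q", "r", "s", "t", "u", "v", "w",
   "x", "y", "z"]

-- inner helper crip_palavra; its argument is list(palavra) on the first call and the previous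
-- pass's output (a list of 1-char strings) afterwards, so the port takes a List String.
-- alfa.index(c) raises ValueError when c ∉ alfa (index? = none): such inputs are excluded by
-- Pre_cript, so the '.getD 0' default is never reached on admitted inputs.
def cripPalavra (opcao : Int) (palavra : List String) : List String :=
  let lista : List Int := palavra.foldl (fun lista c =>
    if c == " " then lista
    else
      let calcv : Int := if opcao == 1 then 26 - (PySem.List.pyGet? sc 0).getD 0
                         else (PySem.List.pyGet? sc 0).getD 0
      lista ++ [(((PySem.List.index? alfa c).getD 0 : Nat) : Int) + calcv]) []
  lista.foldl (fun listaalfa i => listaalfa ++ [(PySem.List.pyGet? alfa i).getD ""]) []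

def cript (opcao : Int) (palavra : String) : List String :=
  let paldecrip := cripPalavra opcao (palavra.toList.map (fun c => String.ofList [c]))
  (PySem.List.pyRange 0 ((PySem.List.pyGet? sc 1).getD 0 - 1) 1).foldl
    (fun paldecrip _ => cripPalavra opcao paldecrip) paldecrip

-- ===== PORT B =====
def alf26 : List String :=
  ["a", "b", "c", "d", "e", "f", "g", "h", "i", "j", "k", "l", "m",
   "n", "o", "p", "q", "r", "s", "t", "u", "v", "w", "x", "y", "z"]

-- ALF.index(c) raises ValueError when c ∉ ALF (index? = none): excluded by Pre_cript,
-- '.getD 0' unreachable on admitted inputs.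
def cript_alt (opcao : Int) (palavra : String) : List String :=
  let total : Int := if opcao == 1 then 4 else 22
  palavra.toList.foldl (fun out c =>
    if String.ofList [c] == " " then out
    else out ++ [(PySem.List.pyGet? alf26
        (PySem.Int.mod ((((PySem.List.index? alf26 (String.ofList [c])).getD 0 : Nat) : Int) + total) 26)).getD ""]) []

-- ===== PRECONDITION & SPEC =====
-- Pre_ excludes exactly the inputs on which A raises ValueError (alfa.index(c) on a character
-- that is neither a space nor a lowercase letter a–z); B raises the same ValueError there.
def Pre_cript (opcao : Int) (palavra : String) : Prop :=
  (palavra.toList.all (fun c => c == ' ' || ('a' ≤ c && c ≤ 'z'))) = true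
instance (opcao : Int) (palavra : String) : Decidable (Pre_cript opcao palavra) := by
  unfold Pre_cript; infer_instance

def pvWitness_cript : Int × String := (1, "abc xyz")

def Spec_cript (opcao : Int) (palavra : String) (out : List String) : Prop := out = cript_alt opcao palavra
instance (opcao : Int) (palavra : String) (out : List String) : Decidable (Spec_cript opcao palavra out) := by unfold Spec_cript; infer_instance

-- ===== CLAIM (what is proved, stated in full; the proofs are below) =====
def Claim_equal_cript : Prop := ∀ (opcao : Int) (palavra : String), Dom_cript opcao palavra → Pre_cript opcao palavra → Spec_cript opcao palavra (cript opcao palavra)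

-- ===== LEMMAS AND PROOFS =====

-- canonical 1-char lowercase string for an index (taken mod 26)
def letterS (j : Nat) : String := String.ofList [Char.ofNat (97 + j % 26)]

def chIdx (c : Char) : Nat := c.toNat - 97

theorem letterS_mod (j : Nat) : letterS (j % 26) = letterS j := by
  unfold letterS
  rw [Nat.mod_mod_of_dvd _ dvd_rfl]

theorem letterS_ne_space (j : Nat) : (letterS j == " ") = false := by
  have h : ∀ k : Fin 26, (letterS k.val == " ") = false := by decide
  have := h ⟨j % 26, Nat.mod_lt _ (by omega)⟩
  rw [letterS_mod] at this
  exact this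

theorem letterS_congr {j k : Nat} (h : j % 26 = k % 26) : letterS j = letterS k := by
  simp [letterS, h]

theorem sgl_eq_space (c : Char) : ((String.ofList [c]) == " ") = (c == ' ') := by
  cases h : c == ' '
  · simp_all
    intro hh
    have := congrArg String.toList hh
    simp at this; simp_all
  · simp_all

theorem letterS_of_char (c : Char) (h1 : 'a' ≤ c) (h2 : c ≤ 'z') :
    letterS (chIdx c) = String.ofList [c] := by
  have h1' : 97 ≤ c.toNat := h1
  have h2' : c.toNat ≤ 122 := h2
  have : 97 + (c.toNat - 97) % 26 = c.toNat := by omega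
  simp [letterS, chIdx, this, Char.ofNat_toNat]

theorem chIdx_lt (c : Char) (h1 : 'a' ≤ c) (h2 : c ≤ 'z') : chIdx c < 26 := by
  have h1' : 97 ≤ c.toNat := h1
  have h2' : c.toNat ≤ 122 := h2
  simp only [chIdx]; omega

theorem index?_alfa_fin (j : Fin 26) : PySem.List.index? alfa (letterS j.val) = some j.val := by
  revert j; decide

theorem index?_alfa_of_lt {j : Nat} (h : j < 26) : PySem.List.index? alfa (letterS j) = some j :=
  index?_alfa_fin ⟨j, h⟩

theorem pyGet?_alfa20 (j : Fin 26) :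
    PySem.List.pyGet? alfa ((j.val : Int) + ((20 : Nat) : Int)) = some (letterS (j.val + 20)) := by
  revert j; decide

theorem pyGet?_alfa6 (j : Fin 26) :
    PySem.List.pyGet? alfa ((j.val : Int) + ((6 : Nat) : Int)) = some (letterS (j.val + 6)) := by
  revert j; decide

theorem pyGet?_alfaN {j : Nat} (hj : j < 26) (n : Nat) (hn : n = 20 ∨ n = 6) :
    PySem.List.pyGet? alfa ((j : Int) + (n : Int)) = some (letterS (j + n)) := by
  rcases hn with rfl | rfl
  · exact pyGet?_alfa20 ⟨j, hj⟩
  · exact pyGet?_alfa6 ⟨j, hj⟩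

-- per-element value of B's body on a canonical letter, for the two total shifts
theorem alt_elem4 (j : Fin 26) :
    (PySem.List.pyGet? alf26
        (PySem.Int.mod ((((PySem.List.index? alf26 (letterS j.val)).getD 0 : Nat) : Int) + ((4 : Nat) : Int)) 26)).getD ""
      = letterS (j.val + 4) := by
  revert j; decide

theorem alt_elem22 (j : Fin 26) :
    (PySem.List.pyGet? alf26
        (PySem.Int.mod ((((PySem.List.index? alf26 (letterS j.val)).getD 0 : Nat) : Int) + ((22 : Nat) : Int)) 26)).getD ""
      = letterS (j.val + 22) := by
  revert j; decide

theorem alt_elemN {j : Nat} (hj : j < 26) (t : Nat) (ht : t = 4 ∨ t = 22) :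
    (PySem.List.pyGet? alf26
        (PySem.Int.mod ((((PySem.List.index? alf26 (letterS j)).getD 0 : Nat) : Int) + (t : Int)) 26)).getD ""
      = letterS (j + t) := by
  rcases ht with rfl | rfl
  · exact alt_elem4 ⟨j, hj⟩
  · exact alt_elem22 ⟨j, hj⟩

-- sc[0] and sc[1]
theorem sc0 : (PySem.List.pyGet? sc 0).getD 0 = 6 := by decide
theorem sc1 : (PySem.List.pyGet? sc 1).getD 0 = 8 := by decide

-- one pass of A on the initial list of 1-char strings (Pre_ shape)
theorem cripPalavra_first (opcao : Int) (cs : List Char)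
    (h : ∀ c ∈ cs, c = ' ' ∨ ('a' ≤ c ∧ c ≤ 'z')) :
    cripPalavra opcao (cs.map (fun c => String.ofList [c]))
      = (cs.filter (fun c => c != ' ')).map
          (fun c => letterS (chIdx c + (if opcao == 1 then 20 else 6))) := by
  have hcz : (if opcao == 1 then 26 - ((6:Int)) else (6:Int))
      = (((if opcao == 1 then 20 else 6 : Nat)) : Int) := by
    by_cases hop : (opcao == 1) = true <;> simp [hop]
  have hcases : (if opcao == 1 then (20:Nat) else 6) = 20 ∨ (if opcao == 1 then (20:Nat) else 6) = 6 := by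
    by_cases hop : (opcao == 1) = true <;> simp [hop]
  unfold cripPalavra
  simp only [sc0]
  rw [List.foldl_map]
  rw [show (fun (lista : List Int) (c : Char) =>
        if String.ofList [c] == " " then lista
        else lista ++ [(((PySem.List.index? alfa (String.ofList [c])).getD 0 : Nat) : Int) +
          (if opcao == 1 then 26 - ((6:Int)) else (6:Int))])
      = (fun lista c => if (fun c => c != ' ') c then
          lista ++ [(((PySem.List.index? alfa (String.ofList [c])).getD 0 : Nat) : Int) +
            (((if opcao == 1 then 20 else 6 : Nat)) : Int)]
          else lista) from ?_]
  · rw [PySem.List.foldl_append_if, PySem.List.foldl_append_singleton_eq_map]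
    simp only [List.nil_append, List.map_map]
    apply List.map_congr_left
    intro c hc
    have hcm := List.mem_of_mem_filter hc
    have hcp := List.of_mem_filter hc
    rcases h c hcm with rfl | ⟨h1, h2⟩
    · simp at hcp
    · have hlt := chIdx_lt c h1 h2
      simp only [Function.comp]
      rw [← letterS_of_char c h1 h2, index?_alfa_of_lt hlt]
      simp only [Option.getD_some]
      rw [pyGet?_alfaN hlt _ hcases]
      rfl
  · funext lista c
    rw [sgl_eq_space, hcz]
    cases hc : c == ' ' <;> simp [hc, bne]

-- one pass of A on a canonical letter list (no hypothesis: letterS is always a letter)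
theorem cripPalavra_canon (opcao : Int) (js : List Nat) :
    cripPalavra opcao (js.map letterS)
      = js.map (fun j => letterS (j % 26 + (if opcao == 1 then 20 else 6))) := by
  have hcz : (if opcao == 1 then 26 - ((6:Int)) else (6:Int))
      = (((if opcao == 1 then 20 else 6 : Nat)) : Int) := by
    by_cases hop : (opcao == 1) = true <;> simp [hop]
  have hcases : (if opcao == 1 then (20:Nat) else 6) = 20 ∨ (if opcao == 1 then (20:Nat) else 6) = 6 := by
    by_cases hop : (opcao == 1) = true <;> simp [hop]
  unfold cripPalavra
  simp only [sc0]
  rw [List.foldl_map]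
  rw [show (fun (lista : List Int) (j : Nat) =>
        if letterS j == " " then lista
        else lista ++ [(((PySem.List.index? alfa (letterS j)).getD 0 : Nat) : Int) +
          (if opcao == 1 then 26 - ((6:Int)) else (6:Int))])
      = (fun lista j => lista ++ [(((PySem.List.index? alfa (letterS j)).getD 0 : Nat) : Int) +
          (((if opcao == 1 then 20 else 6 : Nat)) : Int)]) from ?_]
  · rw [PySem.List.foldl_append_singleton_eq_map,
        PySem.List.foldl_append_singleton_eq_map]
    simp only [List.nil_append, List.map_map]
    apply List.map_congr_left
    intro j _
    have hlt : j % 26 < 26 := Nat.mod_lt _ (by omega)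
    simp only [Function.comp]
    rw [← letterS_mod j, index?_alfa_of_lt hlt]
    simp only [Option.getD_some]
    rw [pyGet?_alfaN hlt _ hcases]
    rfl
  · funext lista j
    rw [letterS_ne_space, hcz]
    simp

-- B in canonical form
theorem cript_alt_canonical (opcao : Int) (palavra : String)
    (hpre : ∀ c ∈ palavra.toList, c = ' ' ∨ ('a' ≤ c ∧ c ≤ 'z')) :
    cript_alt opcao palavra
      = (palavra.toList.filter (fun c => c != ' ')).map
          (fun c => letterS (chIdx c + (if opcao == 1 then 4 else 22))) := by
  have htz : (if opcao == 1 then (4:Int) else 22)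
      = (((if opcao == 1 then 4 else 22 : Nat)) : Int) := by
    by_cases hop : (opcao == 1) = true <;> simp [hop]
  have hcases : (if opcao == 1 then (4:Nat) else 22) = 4 ∨ (if opcao == 1 then (4:Nat) else 22) = 22 := by
    by_cases hop : (opcao == 1) = true <;> simp [hop]
  show (palavra.toList.foldl (fun out c =>
    if String.ofList [c] == " " then out
    else out ++ [(PySem.List.pyGet? alf26
        (PySem.Int.mod ((((PySem.List.index? alf26 (String.ofList [c])).getD 0 : Nat) : Int) +
          (if opcao == 1 then (4:Int) else 22)) 26)).getD ""]) []) = _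
  rw [show (fun (out : List String) (c : Char) =>
        if String.ofList [c] == " " then out
        else out ++ [(PySem.List.pyGet? alf26
          (PySem.Int.mod ((((PySem.List.index? alf26 (String.ofList [c])).getD 0 : Nat) : Int) +
            (if opcao == 1 then (4:Int) else 22)) 26)).getD ""])
      = (fun out c => if (fun c => c != ' ') c then
          out ++ [(PySem.List.pyGet? alf26
            (PySem.Int.mod ((((PySem.List.index? alf26 (String.ofList [c])).getD 0 : Nat) : Int) +
              (((if opcao == 1 then 4 else 22 : Nat)) : Int)) 26)).getD ""] else out) from ?_]
  · rw [PySem.List.foldl_append_if]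
    simp only [List.nil_append]
    apply List.map_congr_left
    intro c hc
    have hcm := List.mem_of_mem_filter hc
    have hcp := List.of_mem_filter hc
    rcases hpre c hcm with rfl | ⟨h1, h2⟩
    · simp at hcp
    · have hlt := chIdx_lt c h1 h2
      rw [← letterS_of_char c h1 h2]
      exact alt_elemN hlt _ hcases
  · funext out c
    rw [sgl_eq_space, htz]
    cases hc : c == ' ' <;> simp [hc, bne]

-- ===== VERDICT (by name: the statement is the Claim_ definition above) =====
theorem cript_spec : Claim_equal_cript := by
  intro opcao palavra _ hpre0
  have hpre : ∀ c ∈ palavra.toList, c = ' ' ∨ ('a' ≤ c ∧ c ≤ 'z') := by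
    intro c hc
    have := List.all_eq_true.mp hpre0 c hc
    simp only [Bool.or_eq_true, Bool.and_eq_true, beq_iff_eq, decide_eq_true_eq] at this
    exact this
  unfold Spec_cript
  rw [cript_alt_canonical opcao palavra hpre]
  unfold cript
  simp only [sc1]
  have hr : PySem.List.pyRange 0 ((8:Int) - 1) 1 = [0, 1, 2, 3, 4, 5, 6] := by decide
  rw [hr]
  simp only [List.foldl_cons, List.foldl_nil]
  rw [cripPalavra_first opcao palavra.toList hpre]
  rw [show (fun c => letterS (chIdx c + (if opcao == 1 then 20 else 6)))
      = letterS ∘ (fun c => chIdx c + (if opcao == 1 then 20 else 6)) from rfl, ← List.map_map]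
  rw [cripPalavra_canon]
  rw [show (fun j => letterS (j % 26 + (if opcao == 1 then 20 else 6)))
      = letterS ∘ (fun j => j % 26 + (if opcao == 1 then 20 else 6)) from rfl, ← List.map_map, cripPalavra_canon]
  rw [show (fun j => letterS (j % 26 + (if opcao == 1 then 20 else 6)))
      = letterS ∘ (fun j => j % 26 + (if opcao == 1 then 20 else 6)) from rfl, ← List.map_map, cripPalavra_canon]
  rw [show (fun j => letterS (j % 26 + (if opcao == 1 then 20 else 6)))
      = letterS ∘ (fun j => j % 26 + (if opcao == 1 then 20 else 6)) from rfl, ← List.map_map, cripPalavra_canon]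
  rw [show (fun j => letterS (j % 26 + (if opcao == 1 then 20 else 6)))
      = letterS ∘ (fun j => j % 26 + (if opcao == 1 then 20 else 6)) from rfl, ← List.map_map, cripPalavra_canon]
  rw [show (fun j => letterS (j % 26 + (if opcao == 1 then 20 else 6)))
      = letterS ∘ (fun j => j % 26 + (if opcao == 1 then 20 else 6)) from rfl, ← List.map_map, cripPalavra_canon]
  rw [show (fun j => letterS (j % 26 + (if opcao == 1 then 20 else 6)))
      = letterS ∘ (fun j => j % 26 + (if opcao == 1 then 20 else 6)) from rfl, ← List.map_map, cripPalavra_canon]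
  simp only [List.map_map]
  apply List.map_congr_left
  intro c _
  simp only [Function.comp]
  apply letterS_congr
  by_cases hop : (opcao == 1) = true <;> simp only [hop, if_true, Bool.false_eq_true, if_false] <;> omega
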